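-- pv_equiv track=rewrite | github.com/tomasb01/AI_Scout | aiscout/scanners/git_scanner.py | _pick_primary_provider
-- ===== SOURCE A (Python) =====
-- _PROVIDER_SUPERSEDES = {
--     "azure_openai": "openai",
-- }
--
-- _FRAMEWORK_PROVIDERS = {"langchain", "llamaindex", "semantic-kernel", "mcp"}
--
-- def _pick_primary_provider(providers: list[str]) -> str:
--     """Pick the provider shown prominently on the asset card.
--
--     Rules (in order):
--     1. If a provider supersedes another present one (Azure OpenAI over
--        OpenAI), drop the superseded provider.
--     2. Prefer direct LLM/vector providers over generic frameworks
--        (LangChain wraps the real destination — LangChain alone is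
--        uninformative for residency questions).
--     3. Fall back to alphabetical order for deterministic ties.
--     """
--     if not providers:
--         return ""
--     pool = set(providers)
--     for specific, general in _PROVIDER_SUPERSEDES.items():
--         if specific in pool and general in pool:
--             pool.discard(general)
--     concrete = sorted(p for p in pool if p not in _FRAMEWORK_PROVIDERS)
--     if concrete:
--         return concrete[0]
--     return sorted(pool)[0]
-- ===== SOURCE B (Python) =====
-- _FRAMEWORK_PROVIDERS = {"langchain", "llamaindex", "semantic-kernel", "mcp"}
--
--
-- def _pick_primary_provider(providers: list[str]) -> str:
--     """Single linear pass: track the smallest non-framework name and the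
--     smallest name overall, skipping 'openai' when 'azure_openai' supersedes it.
--     No set construction, no sorting."""
--     if not providers:
--         return ""
--     drop_openai = "azure_openai" in providers and "openai" in providers
--     best_concrete = None
--     best_any = None
--     for p in providers:
--         if drop_openai and p == "openai":
--             continue
--         if best_any is None or p < best_any:
--             best_any = p
--         if p not in _FRAMEWORK_PROVIDERS and (best_concrete is None or p < best_concrete):
--             best_concrete = p
--     return best_concrete if best_concrete is not None else best_any
-- ===== Notes on version B (the rewrite author's own statement) =====
-- stated objective: alternative
-- what changed: Replaced the set-build plus two filtered sorts with a single linear pass that tracks the smallest non-framework name and the smallest name overall, skipping the superseded 'openai' on the fly.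
import Mathlib
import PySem

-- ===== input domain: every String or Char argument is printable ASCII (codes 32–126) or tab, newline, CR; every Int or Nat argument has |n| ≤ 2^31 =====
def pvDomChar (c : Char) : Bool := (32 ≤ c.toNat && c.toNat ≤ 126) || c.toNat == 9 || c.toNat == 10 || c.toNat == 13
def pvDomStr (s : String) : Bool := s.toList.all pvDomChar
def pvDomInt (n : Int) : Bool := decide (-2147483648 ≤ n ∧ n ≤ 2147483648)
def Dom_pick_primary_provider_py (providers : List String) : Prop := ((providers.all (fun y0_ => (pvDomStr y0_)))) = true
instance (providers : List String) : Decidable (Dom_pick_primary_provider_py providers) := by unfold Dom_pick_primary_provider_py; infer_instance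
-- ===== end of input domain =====

-- B replaces A's set-build plus two filtered sorts by one linear pass tracking two running minima (objective: alternative).

-- ===== PORT A =====
def pvSupersedes : List (String × String) := [("azure_openai", "openai")]
def pvFrameworks : PySem.Set String := PySem.Set.ofList ["langchain", "llamaindex", "semantic-kernel", "mcp"]

def pick_primary_provider_py (providers : List String) : String :=
  if providers = [] then ""
  else
    let pool := pvSupersedes.foldl
      (fun pool sg =>
        if PySem.Set.contains pool sg.1 && PySem.Set.contains pool sg.2
        then PySem.Set.discard pool sg.2 else pool)
      (PySem.Set.ofList providers)
    let concrete := PySem.List.sorted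
      (pool.filter (fun p => !(PySem.Set.contains pvFrameworks p))) (fun x => x) false
    match concrete with
    | c :: _ => c
    | [] => (PySem.List.sorted pool (fun x => x) false).headD ""
      -- pool is nonempty here (providers ≠ []), so sorted(pool)[0] never raises; headD's default is unreachable

-- ===== PORT B =====
-- 'best is None or p < best' update, one comparison per element
def pvOptMin (o : Option String) (p : String) : Option String :=
  match o with
  | none => some p
  | some b => if p < b then some p else some b

def pick_primary_provider_py_alt (providers : List String) : String :=
  if providers = [] then ""
  else
    let dropOpenai := providers.contains "azure_openai" && providers.contains "openai"
    let r := providers.foldl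
      (fun (acc : Option String × Option String) p =>
        if dropOpenai && p == "openai" then acc
        else
          (if !(PySem.Set.contains pvFrameworks p) then pvOptMin acc.1 p else acc.1,
           pvOptMin acc.2 p))
      (none, none)
    match r.1 with
    | some c => c
    | none => r.2.getD ""

-- ===== PRECONDITION & SPEC =====
def Spec_pick_primary_provider_py (providers : List String) (out : String) : Prop := out = pick_primary_provider_py_alt providers
instance (providers : List String) (out : String) : Decidable (Spec_pick_primary_provider_py providers out) := by unfold Spec_pick_primary_provider_py; infer_instance

-- ===== CLAIM (what is proved, stated in full; the proofs are below) =====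
def Claim_equal_pick_primary_provider_py : Prop := ∀ (providers : List String), Dom_pick_primary_provider_py providers → Spec_pick_primary_provider_py providers (pick_primary_provider_py providers)

-- ===== LEMMAS AND PROOFS =====

lemma pvOptMin_some (b p : String) : pvOptMin (some b) p = some (min b p) := by
  unfold pvOptMin
  rcases lt_or_ge p b with h | h
  · simp [h, min_eq_right h.le]
  · simp [not_lt.2 h, min_eq_left h]

lemma foldl_pvOptMin_some (t : List String) (x : String) :
    t.foldl pvOptMin (some x) = some (t.foldl min x) := by
  induction t generalizing x with
  | nil => rfl
  | cons y t ih => simp [List.foldl, pvOptMin_some, ih]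

lemma foldl_pvOptMin_cons (x : String) (t : List String) :
    (x :: t).foldl pvOptMin none = some (t.foldl min x) := by
  simpa [List.foldl, pvOptMin] using foldl_pvOptMin_some t x

lemma least_unique (S : String → Prop) (a b : String)
    (ha : S a) (hb : S b) (ha' : ∀ y, S y → a ≤ y) (hb' : ∀ y, S y → b ≤ y) : a = b :=
  le_antisymm (ha' b hb) (hb' a ha)

-- B's loop, split into the two independent running minima over the kept elements
lemma foldl_step_pair (l : List String) (skip nf : String → Bool) (a b : Option String) :
    l.foldl (fun (acc : Option String × Option String) p =>
        if skip p then acc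
        else (if nf p then pvOptMin acc.1 p else acc.1, pvOptMin acc.2 p)) (a, b) =
      (((l.filter (fun p => !skip p)).filter nf).foldl pvOptMin a,
       (l.filter (fun p => !skip p)).foldl pvOptMin b) := by
  induction l generalizing a b with
  | nil => rfl
  | cons x t ih =>
    by_cases h : skip x = true
    · simp [List.foldl, h, ih]
    · by_cases h2 : nf x = true <;>
        simp [List.foldl, h, h2, List.filter, ih]

lemma contains_ofList (l : List String) (x : String) :
    PySem.Set.contains (PySem.Set.ofList l) x = l.contains x := by
  simp [PySem.Set.mem_ofList]

-- least element of a cons-list computed by the running-min fold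
lemma foldl_min_least (x : String) (t : List String) :
    (t.foldl min x ∈ x :: t) ∧ ∀ y ∈ x :: t, t.foldl min x ≤ y := by
  refine ⟨?_, ?_⟩
  · rcases PySem.List.foldl_min_mem t x with h | h
    · rw [h]; exact List.mem_cons_self
    · exact List.mem_cons_of_mem _ h
  · intro y hy
    rcases List.mem_cons.1 hy with h | hy
    · rw [h]; exact (PySem.List.foldl_min_le t x).1
    · exact (PySem.List.foldl_min_le t x).2 y hy

theorem main_nonnil (providers : List String) (hnil : providers ≠ []) :
    (let pool := if PySem.Set.contains (PySem.Set.ofList providers) "azure_openai" &&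
                    PySem.Set.contains (PySem.Set.ofList providers) "openai"
                 then PySem.Set.discard (PySem.Set.ofList providers) "openai"
                 else PySem.Set.ofList providers
     let concrete := PySem.List.sorted
       (pool.filter (fun p => !(PySem.Set.contains pvFrameworks p))) (fun x => x) false
     match concrete with
     | c :: _ => c
     | [] => (PySem.List.sorted pool (fun x => x) false).headD "") =
    (let dropOpenai := providers.contains "azure_openai" && providers.contains "openai"
     let r := providers.foldl
       (fun (acc : Option String × Option String) p =>
         if dropOpenai && p == "openai" then acc
         else
           (if !(PySem.Set.contains pvFrameworks p) then pvOptMin acc.1 p else acc.1,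
            pvOptMin acc.2 p))
       (none, none)
     match r.1 with
     | some c => c
     | none => r.2.getD "") := by
  simp only [contains_ofList]
  set dropB := providers.contains "azure_openai" && providers.contains "openai" with hdrop
  set nonF : String → Bool := fun p => !(PySem.Set.contains pvFrameworks p) with hnonF
  set keepB : String → Bool := fun p => !(dropB && p == "openai") with hkeep
  -- B's fold splits componentwise and into filters
  have hsplit : providers.foldl
      (fun (acc : Option String × Option String) p =>
        if dropB && p == "openai" then acc
        else (if nonF p then pvOptMin acc.1 p else acc.1, pvOptMin acc.2 p))
      (none, none) =
      (((providers.filter keepB).filter nonF).foldl pvOptMin none,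
        (providers.filter keepB).foldl pvOptMin none) := by
    have := foldl_step_pair providers (fun p => dropB && p == "openai") nonF none none
    simpa [hkeep] using this
  rw [hsplit]
  -- membership bridge: the pruned pool has the same members as the kept list
  set P := (if dropB = true then PySem.Set.discard (PySem.Set.ofList providers) "openai"
            else PySem.Set.ofList providers) with hP
  set K := providers.filter keepB with hKdef
  have hmemK : ∀ x, x ∈ K ↔ x ∈ providers ∧ keepB x = true := by
    intro x; simp [hKdef, List.mem_filter]
  have hmem : ∀ x, x ∈ P ↔ x ∈ K := by
    intro x
    rcases hd : dropB with _ | _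
    · simp [hP, hd, PySem.Set.mem_ofList, hmemK, hkeep]
    · simp [hP, hd, PySem.Set.mem_discard, PySem.Set.mem_ofList, hmemK, hkeep]
  have hmemF : ∀ x, x ∈ P.filter nonF ↔ x ∈ K.filter nonF := by
    intro x; simp [List.mem_filter, hmem]
  -- K is nonempty
  have hKne : K ≠ [] := by
    rcases List.exists_mem_of_ne_nil providers hnil with ⟨h0, hh0⟩
    rcases hd : dropB with _ | _
    · intro hKnil
      have : h0 ∈ K := (hmemK h0).2 ⟨hh0, by simp [hkeep, hd]⟩
      simp [hKnil] at this
    · intro hKnil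
      have haz : ("azure_openai" : String) ∈ providers := by
        have h2 := hd; rw [hdrop] at h2
        simp at h2
        exact h2.1
      have : ("azure_openai" : String) ∈ K := (hmemK _).2 ⟨haz, by simp [hkeep, hd]⟩
      simp [hKnil] at this
  -- case on A's concrete list
  cases hc : PySem.List.sorted (P.filter nonF) (fun x => x) false with
  | cons c ct =>
    have hcP : c ∈ P.filter nonF := by
      have : c ∈ PySem.List.sorted (P.filter nonF) (fun x => x) false := by
        rw [hc]; exact List.mem_cons_self
      exact (PySem.List.mem_sorted _ _ _ _).1 this
    have hcle : ∀ y ∈ P.filter nonF, c ≤ y := fun y hy =>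
      PySem.List.key_head_sorted_le _ _ hc y hy
    have hKFne : K.filter nonF ≠ [] := by
      intro h
      have := (hmemF c).1 hcP
      simp [h] at this
    cases hKF : K.filter nonF with
    | nil => exact absurd hKF hKFne
    | cons x t =>
      rw [foldl_pvOptMin_cons]
      simp only []
      have hleast := foldl_min_least x t
      exact least_unique (fun z => z ∈ x :: t) c (t.foldl min x)
        (by rw [← hKF]; exact (hmemF c).1 hcP) hleast.1
        (fun y hy => hcle y ((hmemF y).2 (by rw [hKF]; exact hy)))
        (fun y hy => hleast.2 y hy)
  | nil =>
    have hPFnil : P.filter nonF = [] := (PySem.List.sorted_eq_nil_iff _ _ _).1 hc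
    have hKFnil : K.filter nonF = [] := by
      rw [List.eq_nil_iff_forall_not_mem]
      intro x hx
      have := (hmemF x).2 hx
      simp [hPFnil] at this
    rw [hKFnil]
    simp only [List.foldl_nil]
    -- both fall back to the overall minimum
    cases hK : K with
    | nil => exact absurd hK hKne
    | cons x t =>
      rw [foldl_pvOptMin_cons]
      simp only [Option.getD_some]
      have hPne : P ≠ [] := by
        intro h
        have : x ∈ P := (hmem x).2 (by rw [hK]; exact List.mem_cons_self)
        simp [h] at this
      cases hs : PySem.List.sorted P (fun x => x) false with
      | nil => exact absurd ((PySem.List.sorted_eq_nil_iff _ _ _).1 hs) hPne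
      | cons m mt =>
        simp only [List.headD_cons]
        have hmP : m ∈ P := (PySem.List.mem_sorted _ _ _ _).1 (by rw [hs]; exact List.mem_cons_self)
        have hmle : ∀ y ∈ P, m ≤ y := fun y hy => PySem.List.key_head_sorted_le _ _ hs y hy
        have hleast := foldl_min_least x t
        exact least_unique (fun z => z ∈ x :: t) m (t.foldl min x)
          (by rw [← hK]; exact (hmem m).1 hmP) hleast.1
          (fun y hy => hmle y ((hmem y).2 (by rw [hK]; exact hy)))
          (fun y hy => hleast.2 y hy)

theorem main_equiv (providers : List String) :
    pick_primary_provider_py providers = pick_primary_provider_py_alt providers := by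
  by_cases hnil : providers = []
  · simp [pick_primary_provider_py, pick_primary_provider_py_alt, hnil]
  · simp only [pick_primary_provider_py, pick_primary_provider_py_alt, if_neg hnil,
      pvSupersedes, List.foldl]
    exact main_nonnil providers hnil

-- ===== VERDICT (by name: the statement is the Claim_ definition above) =====
theorem pick_primary_provider_py_spec : Claim_equal_pick_primary_provider_py := by
  intro providers _
  unfold Spec_pick_primary_provider_py
  exact main_equiv providers
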